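-- pv_equiv track=rewrite | github.com/zijiancogito/decompiler-eval | src/analyze/path-acc/decompiler-cmp/compare_bb.py | split_errs
-- ===== SOURCE A (Python) =====
-- import copy
--
-- def split_errs(errs):
--     flag = 0
--     common_files = set()
--     for decompiler in errs:
--         if flag == 0:
--             common_files = common_files.union(set(errs[decompiler].keys()))
--             flag = 1
--         else:
--             common_files = common_files.intersection(set(errs[decompiler].keys()))
--
--     flag = 0
--     common_errs = {}
--     for decompiler in errs:
--         for err_file in errs[decompiler]:
--             if err_file in common_files and flag == 0:
--                 irs = set().union(set(errs[decompiler][err_file][0]))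
--                 cs = set().union(set(errs[decompiler][err_file][0]))
--                 common_errs[err_file] = (copy.deepcopy(irs), copy.deepcopy(cs))
--             elif err_file in common_files and flag != 0:
--                 irs = common_errs[err_file][0].intersection(set(errs[decompiler][err_file][0]))
--                 cs = common_errs[err_file][1].intersection(set(errs[decompiler][err_file][0]))
--                 common_errs[err_file] = (copy.deepcopy(irs), copy.deepcopy(cs))
--             else:
--                 continue
--         flag = 1
--
--     other_errs = {}
--     for decompiler in errs:
--         other_errs[decompiler] = {}
--         for f in errs[decompiler]:
--             if f not in common_errs:
--                 irs = set(errs[decompiler][f][0])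
--                 cs = set(errs[decompiler][f][1])
--                 other_errs[decompiler][f] = (copy.deepcopy(irs), copy.deepcopy(cs))
--             else:
--                 irs = set(errs[decompiler][f][0]) - common_errs[f][0]
--                 cs = set(errs[decompiler][f][1]) - common_errs[f][1]
--                 other_errs[decompiler][f] = (copy.deepcopy(irs), copy.deepcopy(cs))
--     return common_errs, other_errs
-- ===== SOURCE B (Python) =====
-- def split_errs(errs):
--     # Counting-index algorithm: one pass builds occurrence counters; "common to all
--     # decompilers" then means "counter equals len(errs)" -- no set intersections or
--     # subtractions anywhere.
--     n = len(errs)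
--     file_cnt = {}   # file -> number of decompilers reporting it
--     err_cnt = {}    # (file, ir-error) -> number of decompilers reporting it for that file
--     for d in errs:
--         for f, pair in errs[d].items():
--             file_cnt[f] = file_cnt.get(f, 0) + 1
--             for e in set(pair[0]):
--                 err_cnt[(f, e)] = err_cnt.get((f, e), 0) + 1
--     common_errs = {}
--     if errs:
--         first = next(iter(errs))
--         for f, pair in errs[first].items():
--             if file_cnt[f] == n:
--                 # A derives BOTH slots of the common pair from component [0]; kept as-is
--                 v = {e for e in pair[0] if err_cnt[(f, e)] == n}
--                 common_errs[f] = (v, set(v))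
--     other_errs = {}
--     for d in errs:
--         other_errs[d] = {}
--         for f, pair in errs[d].items():
--             if f in common_errs:
--                 other_errs[d][f] = (
--                     {e for e in pair[0] if err_cnt.get((f, e), 0) != n},
--                     {e for e in pair[1] if err_cnt.get((f, e), 0) != n},
--                 )
--             else:
--                 other_errs[d][f] = (set(pair[0]), set(pair[1]))
--     return common_errs, other_errs
-- ===== Notes on version B (the rewrite author's own statement) =====
-- stated objective: alternative
-- what changed: A's iterated set intersections (for common errors) and set subtractions (for per-decompiler errors) are replaced by a counting index: one pass counts, per file and per (file, error) pair, how many decompilers report it, and 'common to all' becomes 'counter == len(errs)', so both result dicts are built by membership-count filters with no set intersection or difference at all (preserving A's quirk of deriving both slots of the common pair from component [0]).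
import Mathlib
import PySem

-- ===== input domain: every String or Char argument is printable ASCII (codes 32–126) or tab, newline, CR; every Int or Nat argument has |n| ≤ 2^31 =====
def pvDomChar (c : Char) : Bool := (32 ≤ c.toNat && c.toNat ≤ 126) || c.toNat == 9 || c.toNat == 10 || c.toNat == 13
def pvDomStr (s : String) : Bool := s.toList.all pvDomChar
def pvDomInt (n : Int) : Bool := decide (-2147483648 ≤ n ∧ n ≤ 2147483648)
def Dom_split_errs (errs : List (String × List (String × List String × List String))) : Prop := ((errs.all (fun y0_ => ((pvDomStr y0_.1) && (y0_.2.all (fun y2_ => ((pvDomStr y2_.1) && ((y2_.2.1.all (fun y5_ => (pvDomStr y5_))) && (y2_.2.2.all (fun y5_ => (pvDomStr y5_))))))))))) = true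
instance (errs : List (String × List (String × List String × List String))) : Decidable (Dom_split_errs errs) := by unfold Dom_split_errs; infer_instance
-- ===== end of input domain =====

-- B replaces A's iterated set intersections and subtractions by a counting index built in one
-- pass (per-file and per-(file,error) occurrence counters); "common to all decompilers" becomes
-- "counter == len(errs)" and both result dicts are membership-count filters (objective: alternative).

-- ===== PORT A =====
-- A's three passes, each a fold mirroring one of A's `for decompiler in errs` loops.
def pvA_cf (errs : List (String × List (String × List String × List String))) : PySem.Set String :=
  (errs.foldl (fun (st : Int × PySem.Set String) dec =>
      if st.1 == 0 then
        (1, PySem.Set.union st.2 (PySem.Set.ofList (dec.2.map (·.1))))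
      else
        (st.1, PySem.Set.inter st.2 (PySem.Set.ofList (dec.2.map (·.1)))))
    (0, PySem.Set.empty)).2

def pvA_common (errs : List (String × List (String × List String × List String))) :
    PySem.Dict String (List String × List String) :=
  (errs.foldl (fun (st : Int × PySem.Dict String (List String × List String)) dec =>
      (1, dec.2.foldl (fun ce ef =>
        if (pvA_cf errs).contains ef.1 && (st.1 == 0) then
          ce.insert ef.1 (PySem.Set.union PySem.Set.empty (PySem.Set.ofList ef.2.1),
                          PySem.Set.union PySem.Set.empty (PySem.Set.ofList ef.2.1))
        else if (pvA_cf errs).contains ef.1 && !(st.1 == 0) then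
          ce.insert ef.1 (PySem.Set.inter (ce.getD ef.1 ([], [])).1 (PySem.Set.ofList ef.2.1),
                          PySem.Set.inter (ce.getD ef.1 ([], [])).2 (PySem.Set.ofList ef.2.1))
        else ce) st.2))
    (0, PySem.Dict.empty)).2

def pvA_other (errs : List (String × List (String × List String × List String))) :
    PySem.Dict String (List (String × List String × List String)) :=
  errs.foldl (fun oe dec =>
      oe.insert dec.1 ((dec.2.foldl (fun (d : PySem.Dict String (List String × List String)) ef =>
        if !((pvA_common errs).contains ef.1) then
          d.insert ef.1 (PySem.Set.ofList ef.2.1, PySem.Set.ofList ef.2.2)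
        else
          d.insert ef.1 (PySem.Set.diff (PySem.Set.ofList ef.2.1) ((pvA_common errs).getD ef.1 ([], [])).1,
                         PySem.Set.diff (PySem.Set.ofList ef.2.2) ((pvA_common errs).getD ef.1 ([], [])).2))
        PySem.Dict.empty).items))
    PySem.Dict.empty

def split_errs (errs : List (String × List (String × List String × List String))) :
    (List (String × List String × List String)) × (List (String × List (String × List String × List String))) :=
  ((pvA_common errs).items, (pvA_other errs).items)

-- ===== PORT B =====
-- Source B's single counting pass: file_cnt (per file) and err_cnt (per (file, ir-error)) together.
def pvB_cnts (errs : List (String × List (String × List String × List String))) :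
    PySem.Dict String Int × PySem.Dict (String × String) Int :=
  errs.foldl (fun st dec =>
      dec.2.foldl (fun (st : PySem.Dict String Int × PySem.Dict (String × String) Int) ef =>
        (st.1.modify ef.1 0 (· + 1),
         (PySem.Set.ofList ef.2.1).foldl (fun d e => d.modify (ef.1, e) 0 (· + 1)) st.2)) st)
    (PySem.Dict.empty, PySem.Dict.empty)

def split_errs_alt (errs : List (String × List (String × List String × List String))) :
    (List (String × List String × List String)) × (List (String × List (String × List String × List String))) :=
  let n : Int := errs.length
  let cnts := pvB_cnts errs
  let common : PySem.Dict String (List String × List String) :=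
    match errs with
    | [] => PySem.Dict.empty
    | d0 :: _ =>
      d0.2.foldl (fun ce ef =>
        if cnts.1.getD ef.1 0 == n then
          let v : PySem.Set String :=
            PySem.Set.ofList (ef.2.1.filter (fun e => cnts.2.getD (ef.1, e) 0 == n))
          ce.insert ef.1 (v, PySem.Set.ofList v)
        else ce) PySem.Dict.empty
  let other : PySem.Dict String (List (String × List String × List String)) :=
    errs.foldl (fun oe dec =>
      oe.insert dec.1 ((dec.2.foldl (fun (d : PySem.Dict String (List String × List String)) ef =>
          if common.contains ef.1 then
            d.insert ef.1
              (PySem.Set.ofList (ef.2.1.filter (fun e => !(cnts.2.getD (ef.1, e) 0 == n))),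
               PySem.Set.ofList (ef.2.2.filter (fun e => !(cnts.2.getD (ef.1, e) 0 == n))))
          else d.insert ef.1 (PySem.Set.ofList ef.2.1, PySem.Set.ofList ef.2.2))
        PySem.Dict.empty).items)) PySem.Dict.empty
  (common.items, other.items)

-- ===== PRECONDITION & SPEC =====
-- Pre_ excludes association lists with duplicate keys (outer or inner): a Python dict cannot
-- contain duplicate keys, so such lists do not represent any input A receives.
def Pre_split_errs (errs : List (String × List (String × List String × List String))) : Prop :=
  (errs.map (·.1)).Nodup ∧ ∀ p ∈ errs, (p.2.map (·.1)).Nodup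
instance (errs : List (String × List (String × List String × List String))) : Decidable (Pre_split_errs errs) := by unfold Pre_split_errs; infer_instance

def pvWitness_split_errs : (List (String × List (String × List String × List String))) :=
  [("ghidra", [("f1", (["e1", "e2"], ["c1"])), ("f2", (["e3"], []))]),
   ("retdec", [("f1", (["e2"], ["c2"]))])]

def Spec_split_errs (errs : List (String × List (String × List String × List String))) (out : (List (String × List String × List String)) × (List (String × List (String × List String × List String)))) : Prop := out = split_errs_alt errs
instance (errs : List (String × List (String × List String × List String))) (out : (List (String × List String × List String)) × (List (String × List (String × List String × List String)))) : Decidable (Spec_split_errs errs out) := by unfold Spec_split_errs; infer_instance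

-- ===== CLAIM (what is proved, stated in full; the proofs are below) =====
def Claim_equal_split_errs : Prop := ∀ (errs : List (String × List (String × List String × List String))), Dom_split_errs errs → Pre_split_errs errs → Spec_split_errs errs (split_errs errs)

-- ===== LEMMAS AND PROOFS =====

-- errs[d][f]  (first match; only used on keys known to be present)
def pvLookup (fd : List (String × List String × List String)) (f : String) :
    List String × List String :=
  ((fd.find? (fun ef => ef.1 == f)).map (·.2)).getD ([], [])

-- the common normal form both ports are reduced to
def pvCanon (errs : List (String × List (String × List String × List String))) :
    (List (String × List String × List String)) × (List (String × List (String × List String × List String))) :=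
  match errs with
  | [] => ([], [])
  | d0 :: rest =>
    let commonFiles : List String :=
      (d0.2.map (·.1)).filter (fun f => rest.all (fun dec => dec.2.any (fun ef => ef.1 == f)))
    let common : List (String × List String × List String) :=
      commonFiles.map (fun f =>
        let v := rest.foldl (fun s dec => PySem.Set.inter s (PySem.Set.ofList (pvLookup dec.2 f).1))
                   (PySem.Set.ofList (pvLookup d0.2 f).1)
        (f, v, v))
    let other := (d0 :: rest).map (fun dec => (dec.1, dec.2.map (fun ef =>
        match common.find? (fun c => c.1 == ef.1) with
        | some c => (ef.1, PySem.Set.diff (PySem.Set.ofList ef.2.1) c.2.1,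
                           PySem.Set.diff (PySem.Set.ofList ef.2.2) c.2.2)
        | none => (ef.1, PySem.Set.ofList ef.2.1, PySem.Set.ofList ef.2.2))))
    (common, other)

lemma pv_foldl_if_filter {α β : Type} (p : β → Bool) (g : α → β → α) (l : List β) (a : α) :
    l.foldl (fun a b => if p b then g a b else a) a = (l.filter p).foldl g a := by
  induction l generalizing a with
  | nil => rfl
  | cons b t ih =>
    by_cases h : p b <;> simp [h, ih]

lemma pv_p1_flag (rest : List (String × List (String × List String × List String)))
    (s : PySem.Set String) :
    (rest.foldl (fun (st : Int × PySem.Set String) dec =>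
      if st.1 == 0 then
        (1, PySem.Set.union st.2 (PySem.Set.ofList (dec.2.map (·.1))))
      else
        (st.1, PySem.Set.inter st.2 (PySem.Set.ofList (dec.2.map (·.1))))) ((1:Int), s)).2
    = rest.foldl (fun s dec => PySem.Set.inter s (PySem.Set.ofList (dec.2.map (·.1)))) s := by
  induction rest generalizing s with
  | nil => rfl
  | cons d t ih => simpa using ih (PySem.Set.inter s (PySem.Set.ofList (d.2.map (·.1))))

lemma pv_mem_interfold (rest : List (String × List (String × List String × List String)))
    (s : PySem.Set String) (x : String) :
    x ∈ rest.foldl (fun s dec => PySem.Set.inter s (PySem.Set.ofList (dec.2.map (·.1)))) s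
      ↔ x ∈ s ∧ ∀ dec ∈ rest, x ∈ dec.2.map (·.1) := by
  induction rest generalizing s with
  | nil => simp
  | cons d t ih =>
    simp [ih, PySem.Set.mem_inter, PySem.Set.mem_ofList]
    tauto

lemma pv_cf_cons (d0 : String × List (String × List String × List String))
    (rest : List (String × List (String × List String × List String))) :
    pvA_cf (d0 :: rest)
      = rest.foldl (fun s dec => PySem.Set.inter s (PySem.Set.ofList (dec.2.map (·.1))))
          (PySem.Set.union PySem.Set.empty (PySem.Set.ofList (d0.2.map (·.1)))) := by
  rw [pvA_cf]
  exact pv_p1_flag rest _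

lemma pv_cf_mem (d0 : String × List (String × List String × List String))
    (rest : List (String × List (String × List String × List String))) (f : String) :
    f ∈ pvA_cf (d0 :: rest)
      ↔ f ∈ d0.2.map (·.1) ∧ ∀ dec ∈ rest, f ∈ dec.2.map (·.1) := by
  rw [pv_cf_cons, pv_mem_interfold]
  simp [PySem.Set.mem_union, PySem.Set.mem_ofList, PySem.Set.empty]

lemma pv_cf_contains (d0 : String × List (String × List String × List String))
    (rest : List (String × List (String × List String × List String))) (f : String)
    (hf : f ∈ d0.2.map (·.1)) :
    (pvA_cf (d0 :: rest)).contains f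
      = rest.all (fun dec => dec.2.any (fun ef => ef.1 == f)) := by
  rw [Bool.eq_iff_iff, PySem.Set.contains_iff, pv_cf_mem]
  simp only [List.all_eq_true, List.any_eq_true, beq_iff_eq, List.mem_map]
  constructor
  · rintro ⟨-, h⟩ dec hd
    obtain ⟨ef, hef, he⟩ := h dec hd
    exact ⟨ef, hef, he⟩
  · intro h
    refine ⟨List.mem_map.mp hf, fun dec hd => ?_⟩
    obtain ⟨ef, hef, he⟩ := h dec hd
    exact ⟨ef, hef, he⟩

lemma pvLookup_cons_self (e : String × List String × List String)
    (tl : List (String × List String × List String)) : pvLookup (e :: tl) e.1 = e.2 := by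
  simp [pvLookup]

lemma pvLookup_cons_ne (e : String × List String × List String)
    (tl : List (String × List String × List String)) (f : String) (h : f ≠ e.1) :
    pvLookup (e :: tl) f = pvLookup tl f := by
  simp [pvLookup, Ne.symm h]

lemma pvLookup_of_mem (fd : List (String × List String × List String)) :
    (fd.map (·.1)).Nodup → ∀ ef : String × List String × List String, ef ∈ fd →
    pvLookup fd ef.1 = ef.2 := by
  induction fd with
  | nil => intro _ ef hef; cases hef
  | cons a tl ih =>
    intro hnd ef hef
    obtain ⟨ha, htl⟩ := List.nodup_cons.mp (by simpa only [List.map_cons] using hnd)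
    rcases List.mem_cons.mp hef with rfl | h
    · exact pvLookup_cons_self _ _
    · have hne : ef.1 ≠ a.1 := fun hEq => ha (hEq ▸ List.mem_map_of_mem h)
      rw [pvLookup_cons_ne _ _ _ hne]
      exact ih htl ef h

lemma pv_filter_eq_map_lookup (fd : List (String × List String × List String))
    (hfd : (fd.map (·.1)).Nodup) (p : String → Bool) :
    fd.filter (fun ef => p ef.1) = ((fd.map (·.1)).filter p).map (fun f => (f, pvLookup fd f)) := by
  induction fd with
  | nil => rfl
  | cons e tl ih =>
    simp only [List.map_cons, List.filter_cons] at *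
    obtain ⟨he, htl⟩ := List.nodup_cons.mp hfd
    by_cases hp : p e.1
    · simp only [hp, if_pos]
      rw [List.map_cons, pvLookup_cons_self, ih htl]
      congr 1
      apply List.map_congr_left
      intro f hf
      have : f ∈ tl.map (·.1) := List.mem_of_mem_filter hf
      rw [pvLookup_cons_ne _ _ _ (fun hEq => he (hEq ▸ this))]
    · simp only [hp]
      rw [ih htl]
      apply List.map_congr_left
      intro f hf
      have : f ∈ tl.map (·.1) := List.mem_of_mem_filter hf
      rw [pvLookup_cons_ne _ _ _ (fun hEq => he (hEq ▸ this))]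

lemma pv_find?_map {V : Type} (cfs : List String) (h : String → V) (k : String) :
    ((cfs.map (fun f => (f, h f))).find? (fun c => c.1 == k))
      = if k ∈ cfs then some (k, h k) else none := by
  induction cfs with
  | nil => rfl
  | cons f tl ih =>
    simp only [List.map_cons, List.find?_cons]
    by_cases hf : f = k
    · subst hf; simp
    · simp only [List.mem_cons]
      have : ((f, h f).1 == k) = false := by simpa using hf
      rw [this]
      simp [ih, Ne.symm hf]

lemma pv_update_pass
    (cf : PySem.Set String) (cfs : List String) (hcfs : cfs.Nodup)
    (hcf : ∀ g : String, cf.contains g = decide (g ∈ cfs))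
    (fd : List (String × List String × List String)) (hfd : (fd.map (·.1)).Nodup)
    (w : String → List String × List String)
    (d : PySem.Dict String (List String × List String))
    (hd : d.items = cfs.map (fun f => (f, w f))) :
    (fd.foldl (fun ce ef =>
        if cf.contains ef.1 then
          ce.insert ef.1 (PySem.Set.inter (ce.getD ef.1 ([], [])).1 (PySem.Set.ofList ef.2.1),
                          PySem.Set.inter (ce.getD ef.1 ([], [])).2 (PySem.Set.ofList ef.2.1))
        else ce) d).items
      = cfs.map (fun f => (f, if f ∈ fd.map (·.1)
          then (PySem.Set.inter (w f).1 (PySem.Set.ofList (pvLookup fd f).1),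
                PySem.Set.inter (w f).2 (PySem.Set.ofList (pvLookup fd f).1))
          else w f)) := by
  induction fd generalizing w d with
  | nil => simpa using hd
  | cons ef tl ih =>
    have hfd2 : (ef.1 :: tl.map (·.1)).Nodup := by simpa only [List.map_cons] using hfd
    obtain ⟨hhead, htl⟩ := List.nodup_cons.mp hfd2
    have hkeys : d.keys = cfs := by
      simp [PySem.Dict.keys, hd, Function.comp_def]
    have hknd : d.keys.Nodup := by rw [hkeys]; exact hcfs
    simp only [List.foldl_cons]
    by_cases hm : ef.1 ∈ cfs
    · have hc : cf.contains ef.1 = true := by rw [hcf]; simpa using hm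
      rw [hc]
      simp only [if_true]
      have hmemi : (ef.1, w ef.1) ∈ d.items := by
        rw [hd]; exact List.mem_map_of_mem hm
      have hget : d.getD ef.1 ([], []) = w ef.1 := PySem.Dict.getD_of_mem_items d hmemi hknd _
      have hcont : d.contains ef.1 = true := by
        rw [PySem.Dict.contains_iff_mem_keys, hkeys]; exact hm
      set v := (PySem.Set.inter (w ef.1).1 (PySem.Set.ofList ef.2.1),
                PySem.Set.inter (w ef.1).2 (PySem.Set.ofList ef.2.1)) with hv
      have hitems : (d.insert ef.1 v).items
          = cfs.map (fun f => (f, if f = ef.1 then v else w f)) := by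
        rw [PySem.Dict.items_insert_of_contains _ _ hcont, hd, List.map_map]
        apply List.map_congr_left
        intro f _
        by_cases hfe : f = ef.1
        · subst hfe; simp
        · simp [hfe]
      rw [hget, ih htl _ _ hitems]
      apply List.map_congr_left
      intro f _
      by_cases hfe : f = ef.1
      · subst hfe
        simp [hhead, pvLookup_cons_self, hv]
      · simp only [hfe, pvLookup_cons_ne _ _ _ hfe, if_false]
        rw [if_congr (by simp [List.map_cons, List.mem_cons, hfe] : f ∈ List.map (fun x => x.1) (ef :: tl) ↔ f ∈ List.map (fun x => x.1) tl) rfl rfl]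
    · have hc : cf.contains ef.1 = false := by rw [hcf]; simpa using hm
      rw [hc]
      simp only [Bool.false_eq_true, if_false]
      rw [ih htl _ _ hd]
      apply List.map_congr_left
      intro f hfcfs
      have hfe : f ≠ ef.1 := fun hEq => hm (hEq ▸ hfcfs)
      rw [pvLookup_cons_ne _ _ _ hfe]
      rw [if_congr (by simp [List.map_cons, List.mem_cons, hfe] : f ∈ List.map (fun x => x.1) (ef :: tl) ↔ f ∈ List.map (fun x => x.1) tl) rfl rfl]

lemma pv_pair_foldl (rest : List (String × List (String × List String × List String)))
    (x : (String × List (String × List String × List String)) → List String)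
    (s : PySem.Set String) :
    rest.foldl (fun (v : PySem.Set String × PySem.Set String) dec =>
        (PySem.Set.inter v.1 (PySem.Set.ofList (x dec)), PySem.Set.inter v.2 (PySem.Set.ofList (x dec)))) (s, s)
      = (rest.foldl (fun v dec => PySem.Set.inter v (PySem.Set.ofList (x dec))) s,
         rest.foldl (fun v dec => PySem.Set.inter v (PySem.Set.ofList (x dec))) s) := by
  induction rest generalizing s with
  | nil => rfl
  | cons dec t ih => simpa using ih (PySem.Set.inter s (PySem.Set.ofList (x dec)))

lemma pv_rest_pass
    (cf : PySem.Set String) (cfs : List String) (hcfs : cfs.Nodup)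
    (hcf : ∀ g : String, cf.contains g = decide (g ∈ cfs))
    (rest : List (String × List (String × List String × List String)))
    (hrest : ∀ dec ∈ rest, (dec.2.map (·.1)).Nodup)
    (hall : ∀ f ∈ cfs, ∀ dec ∈ rest, f ∈ dec.2.map (·.1))
    (w : String → List String × List String)
    (d : PySem.Dict String (List String × List String))
    (hd : d.items = cfs.map (fun f => (f, w f))) :
    (rest.foldl (fun ce dec => dec.2.foldl (fun ce ef =>
        if cf.contains ef.1 then
          ce.insert ef.1 (PySem.Set.inter (ce.getD ef.1 ([], [])).1 (PySem.Set.ofList ef.2.1),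
                          PySem.Set.inter (ce.getD ef.1 ([], [])).2 (PySem.Set.ofList ef.2.1))
        else ce) ce) d).items
      = cfs.map (fun f => (f, rest.foldl (fun v dec =>
          (PySem.Set.inter v.1 (PySem.Set.ofList (pvLookup dec.2 f).1),
           PySem.Set.inter v.2 (PySem.Set.ofList (pvLookup dec.2 f).1))) (w f))) := by
  induction rest generalizing w d with
  | nil => simpa using hd
  | cons dec rst ih =>
    simp only [List.foldl_cons]
    rw [ih (fun d hd' => hrest d (List.mem_cons_of_mem _ hd'))
        (fun f hf d hd' => hall f hf d (List.mem_cons_of_mem _ hd'))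
        _ _ (pv_update_pass cf cfs hcfs hcf dec.2 (hrest dec (List.mem_cons_self)) w d hd)]
    apply List.map_congr_left
    intro f hf
    have hmem : f ∈ dec.2.map (·.1) := hall f hf dec (List.mem_cons_self)
    simp only [hmem, if_pos]

lemma pv_p2_flag (cf : PySem.Set String)
    (rest : List (String × List (String × List String × List String)))
    (d : PySem.Dict String (List String × List String)) :
    (rest.foldl (fun (st : Int × PySem.Dict String (List String × List String)) dec =>
      (1, dec.2.foldl (fun ce ef =>
        if cf.contains ef.1 && (st.1 == 0) then
          ce.insert ef.1 (PySem.Set.union PySem.Set.empty (PySem.Set.ofList ef.2.1),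
                          PySem.Set.union PySem.Set.empty (PySem.Set.ofList ef.2.1))
        else if cf.contains ef.1 && !(st.1 == 0) then
          ce.insert ef.1 (PySem.Set.inter (ce.getD ef.1 ([], [])).1 (PySem.Set.ofList ef.2.1),
                          PySem.Set.inter (ce.getD ef.1 ([], [])).2 (PySem.Set.ofList ef.2.1))
        else ce) st.2)) ((1:Int), d)).2
    = rest.foldl (fun ce dec => dec.2.foldl (fun ce ef =>
        if cf.contains ef.1 then
          ce.insert ef.1 (PySem.Set.inter (ce.getD ef.1 ([], [])).1 (PySem.Set.ofList ef.2.1),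
                          PySem.Set.inter (ce.getD ef.1 ([], [])).2 (PySem.Set.ofList ef.2.1))
        else ce) ce) d := by
  induction rest generalizing d with
  | nil => rfl
  | cons dec t ih =>
    simp only [List.foldl_cons, show ((1:Int) == 0) = false from rfl, Bool.and_false,
      Bool.false_eq_true, if_false, Bool.not_false, Bool.and_true]
    exact ih _

lemma pv_first_pass (cf : PySem.Set String)
    (fd : List (String × List String × List String)) (hfd : (fd.map (·.1)).Nodup) :
    (fd.foldl (fun ce ef =>
        if cf.contains ef.1 && ((0:Int) == 0) then
          ce.insert ef.1 (PySem.Set.union PySem.Set.empty (PySem.Set.ofList ef.2.1),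
                          PySem.Set.union PySem.Set.empty (PySem.Set.ofList ef.2.1))
        else if cf.contains ef.1 && !((0:Int) == 0) then
          ce.insert ef.1 (PySem.Set.inter (ce.getD ef.1 ([], [])).1 (PySem.Set.ofList ef.2.1),
                          PySem.Set.inter (ce.getD ef.1 ([], [])).2 (PySem.Set.ofList ef.2.1))
        else ce) PySem.Dict.empty).items
      = ((fd.map (·.1)).filter (fun f => cf.contains f)).map
          (fun f => (f, (PySem.Set.ofList (pvLookup fd f).1, PySem.Set.ofList (pvLookup fd f).1))) := by
  simp only [show ((0:Int) == 0) = true from rfl, Bool.and_true, Bool.not_true, Bool.and_false,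
    Bool.false_eq_true, if_false]
  rw [pv_foldl_if_filter]
  rw [PySem.Dict.items_foldl_insert_fresh]
  · rw [pv_filter_eq_map_lookup fd hfd (fun f => cf.contains f), List.map_map]
    rw [show (PySem.Dict.empty : PySem.Dict String (PySem.Set String × PySem.Set String)).items = [] from rfl,
      List.nil_append]
    apply List.map_congr_left
    intro f _
    simp [PySem.Set.union, PySem.Set.update_nil_left, PySem.Set.ofList_ofList]
  · intro a _
    exact PySem.Dict.contains_empty _
  · have hsub : ((fd.filter (fun ef => cf.contains ef.1)).map (·.1)).Sublist (fd.map (·.1)) :=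
      List.Sublist.map _ (List.filter_sublist)
    exact hfd.sublist hsub

lemma pv_common_items (d0 : String × List (String × List String × List String))
    (rest : List (String × List (String × List String × List String)))
    (hpre : Pre_split_errs (d0 :: rest)) :
    (pvA_common (d0 :: rest)).items
      = ((d0.2.map (·.1)).filter (fun f => rest.all (fun dec => dec.2.any (fun ef => ef.1 == f)))).map
          (fun f => (f,
            (rest.foldl (fun s dec => PySem.Set.inter s (PySem.Set.ofList (pvLookup dec.2 f).1))
               (PySem.Set.ofList (pvLookup d0.2 f).1),
             rest.foldl (fun s dec => PySem.Set.inter s (PySem.Set.ofList (pvLookup dec.2 f).1))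
               (PySem.Set.ofList (pvLookup d0.2 f).1)))) := by
  obtain ⟨hod, hinner⟩ := hpre
  have hk0 : (d0.2.map (·.1)).Nodup := hinner d0 List.mem_cons_self
  have hcfs : ((d0.2.map (·.1)).filter
      (fun f => rest.all (fun dec => dec.2.any (fun ef => ef.1 == f)))).Nodup := hk0.filter _
  have hcf : ∀ g : String, (pvA_cf (d0 :: rest)).contains g
      = decide (g ∈ (d0.2.map (·.1)).filter
          (fun f => rest.all (fun dec => dec.2.any (fun ef => ef.1 == f)))) := by
    intro g
    rw [Bool.eq_iff_iff, PySem.Set.contains_iff, pv_cf_mem]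
    simp only [decide_eq_true_eq, List.mem_filter, List.all_eq_true, List.any_eq_true,
      beq_iff_eq, List.mem_map]
  have hfilter : (d0.2.map (·.1)).filter (fun f => (pvA_cf (d0 :: rest)).contains f)
      = (d0.2.map (·.1)).filter (fun f => rest.all (fun dec => dec.2.any (fun ef => ef.1 == f))) :=
    List.filter_congr (fun f hf => pv_cf_contains d0 rest f hf)
  have hce1 := pv_first_pass (pvA_cf (d0 :: rest)) d0.2 hk0
  rw [hfilter] at hce1
  rw [pvA_common, List.foldl_cons]
  dsimp only
  rw [pv_p2_flag, pv_rest_pass (pvA_cf (d0 :: rest)) _ hcfs hcf rest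
    (fun dec hd => hinner dec (List.mem_cons_of_mem _ hd))
    (fun f hf dec hd => by
      have := (List.mem_filter.mp hf).2
      simp only [List.all_eq_true] at this
      have := this dec hd
      simp only [List.any_eq_true, beq_iff_eq] at this
      obtain ⟨ef, hef, he⟩ := this
      exact List.mem_map.mpr ⟨ef, hef, he⟩)
    _ _ hce1]
  apply List.map_congr_left
  intro f _
  rw [pv_pair_foldl rest (fun dec => (pvLookup dec.2 f).1) (PySem.Set.ofList (pvLookup d0.2 f).1)]

lemma pv_inner3 (c : PySem.Dict String (List String × List String))
    (fd : List (String × List String × List String)) (hfd : (fd.map (·.1)).Nodup) :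
    (fd.foldl (fun (d : PySem.Dict String (List String × List String)) ef =>
        if !(c.contains ef.1) then
          d.insert ef.1 (PySem.Set.ofList ef.2.1, PySem.Set.ofList ef.2.2)
        else
          d.insert ef.1 (PySem.Set.diff (PySem.Set.ofList ef.2.1) (c.getD ef.1 ([], [])).1,
                         PySem.Set.diff (PySem.Set.ofList ef.2.2) (c.getD ef.1 ([], [])).2))
      PySem.Dict.empty).items
    = fd.map (fun ef => (ef.1,
        if !(c.contains ef.1) then (PySem.Set.ofList ef.2.1, PySem.Set.ofList ef.2.2)
        else (PySem.Set.diff (PySem.Set.ofList ef.2.1) (c.getD ef.1 ([], [])).1,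
              PySem.Set.diff (PySem.Set.ofList ef.2.2) (c.getD ef.1 ([], [])).2))) := by
  have hfun : (fun (d : PySem.Dict String (List String × List String)) (ef : String × List String × List String) =>
        if !(c.contains ef.1) then
          d.insert ef.1 (PySem.Set.ofList ef.2.1, PySem.Set.ofList ef.2.2)
        else
          d.insert ef.1 (PySem.Set.diff (PySem.Set.ofList ef.2.1) (c.getD ef.1 ([], [])).1,
                         PySem.Set.diff (PySem.Set.ofList ef.2.2) (c.getD ef.1 ([], [])).2))
      = (fun (d : PySem.Dict String (List String × List String)) (ef : String × List String × List String) =>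
          d.insert ef.1 (if !(c.contains ef.1) then (PySem.Set.ofList ef.2.1, PySem.Set.ofList ef.2.2)
            else (PySem.Set.diff (PySem.Set.ofList ef.2.1) (c.getD ef.1 ([], [])).1,
                  PySem.Set.diff (PySem.Set.ofList ef.2.2) (c.getD ef.1 ([], [])).2))) := by
    funext d ef
    by_cases h : c.contains ef.1 <;> simp [h]
  rw [hfun, PySem.Dict.items_foldl_insert_fresh]
  · simp [show (PySem.Dict.empty : PySem.Dict String (List String × List String)).items = [] from rfl]
  · intro a _
    exact PySem.Dict.contains_empty _
  · exact hfd

lemma pv_other_entry (c : PySem.Dict String (List String × List String))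
    (cfs : List String) (hnd : cfs.Nodup) (h : String → List String × List String)
    (hc : c.items = cfs.map (fun f => (f, h f)))
    (ef : String × List String × List String) :
    (ef.1, (if !(c.contains ef.1) then (PySem.Set.ofList ef.2.1, PySem.Set.ofList ef.2.2)
     else (PySem.Set.diff (PySem.Set.ofList ef.2.1) (c.getD ef.1 ([], [])).1,
           PySem.Set.diff (PySem.Set.ofList ef.2.2) (c.getD ef.1 ([], [])).2)))
    = (match (cfs.map (fun f => (f, h f))).find? (fun cc => cc.1 == ef.1) with
       | some cc => (ef.1, PySem.Set.diff (PySem.Set.ofList ef.2.1) cc.2.1,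
                     PySem.Set.diff (PySem.Set.ofList ef.2.2) cc.2.2)
       | none => (ef.1, PySem.Set.ofList ef.2.1, PySem.Set.ofList ef.2.2)) := by
  have hkeys : c.keys = cfs := by simp [PySem.Dict.keys, hc, Function.comp_def]
  have hknd : c.keys.Nodup := by rw [hkeys]; exact hnd
  rw [pv_find?_map cfs h ef.1]
  by_cases hm : ef.1 ∈ cfs
  · have hcont : c.contains ef.1 = true := by
      rw [PySem.Dict.contains_iff_mem_keys, hkeys]; exact hm
    have hget : c.getD ef.1 ([], []) = h ef.1 :=
      PySem.Dict.getD_of_mem_items c (by rw [hc]; exact List.mem_map_of_mem hm) hknd _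
    simp [hm, hcont, hget]
  · have hcont : c.contains ef.1 = false := by
      rw [Bool.eq_false_iff]
      intro hx
      exact hm (hkeys ▸ Iff.mp (PySem.Dict.contains_iff_mem_keys c ef.1) hx)
    simp [hm, hcont]

lemma pv_A_canon (errs : List (String × List (String × List String × List String)))
    (hpre : Pre_split_errs errs) : split_errs errs = pvCanon errs := by
  cases errs with
  | nil => rfl
  | cons d0 rest =>
    obtain ⟨hod, hinner⟩ := hpre
    have hk0 : (d0.2.map (·.1)).Nodup := hinner d0 List.mem_cons_self
    have hcfs : ((d0.2.map (·.1)).filter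
        (fun f => rest.all (fun dec => dec.2.any (fun ef => ef.1 == f)))).Nodup := hk0.filter _
    have hcommon := pv_common_items d0 rest ⟨hod, hinner⟩
    rw [split_errs, pvCanon]
    dsimp only
    rw [Prod.mk.injEq]
    refine ⟨hcommon, ?_⟩
    rw [pvA_other, PySem.Dict.items_foldl_insert_fresh]
    · rw [show (PySem.Dict.empty : PySem.Dict String (List (String × List String × List String))).items = [] from rfl,
        List.nil_append]
      apply List.map_congr_left
      intro dec hdec
      refine congrArg _ ?_
      rw [pv_inner3 (pvA_common (d0 :: rest)) dec.2 (hinner dec hdec)]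
      apply List.map_congr_left
      intro ef _
      exact pv_other_entry (pvA_common (d0 :: rest)) _ hcfs _ hcommon ef
    · intro a _
      exact PySem.Dict.contains_empty _
    · exact hod

-- ===== B-side lemmas =====

def pvFileStep (a : PySem.Dict String Int)
    (dec : String × List (String × List String × List String)) : PySem.Dict String Int :=
  dec.2.foldl (fun d ef => d.modify ef.1 0 (· + 1)) a

def pvErrStep (b : PySem.Dict (String × String) Int)
    (dec : String × List (String × List String × List String)) : PySem.Dict (String × String) Int :=
  dec.2.foldl (fun d ef => (PySem.Set.ofList ef.2.1).foldl (fun d e => d.modify (ef.1, e) 0 (· + 1)) d) b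

lemma pv_foldl_key {α β κ : Type} (key : β → κ) (g : α → κ → α) (l : List β) (a : α) :
    l.foldl (fun d x => g d (key x)) a = (l.map key).foldl g a := by
  induction l generalizing a with
  | nil => rfl
  | cons x xs ih => simpa using ih (g a (key x))

-- "decompiler dec reports ir-error e for file f"
def pvHas (fd : List (String × List String × List String)) (f e : String) : Bool :=
  fd.any (fun ef => ef.1 == f && ef.2.1.contains e)

lemma pv_cnts_split (errs : List (String × List (String × List String × List String)))
    (a : PySem.Dict String Int) (b : PySem.Dict (String × String) Int) :
    errs.foldl (fun st dec =>
      dec.2.foldl (fun (st : PySem.Dict String Int × PySem.Dict (String × String) Int) ef =>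
        (st.1.modify ef.1 0 (· + 1),
         (PySem.Set.ofList ef.2.1).foldl (fun d e => d.modify (ef.1, e) 0 (· + 1)) st.2)) st) (a, b)
    = (errs.foldl pvFileStep a, errs.foldl pvErrStep b) := by
  induction errs generalizing a b with
  | nil => rfl
  | cons dec rest ih =>
    simp only [List.foldl_cons]
    rw [PySem.List.foldl_prod_mk
      (fun (d : PySem.Dict String Int) (ef : String × List String × List String) => d.modify ef.1 0 (· + 1))
      (fun (d : PySem.Dict (String × String) Int) (ef : String × List String × List String) =>
        (PySem.Set.ofList ef.2.1).foldl (fun d e => d.modify (ef.1, e) 0 (· + 1)) d)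
      dec.2 a b]
    exact ih _ _

lemma pv_fileCnt (errs : List (String × List (String × List String × List String)))
    (hin : ∀ dec ∈ errs, (dec.2.map (·.1)).Nodup) (d : PySem.Dict String Int) (f : String) :
    (errs.foldl pvFileStep d).getD f 0
      = d.getD f 0 + (errs.countP (fun dec => decide (f ∈ dec.2.map (·.1))) : Int) := by
  induction errs generalizing d with
  | nil => simp
  | cons dec rest ih =>
    rw [List.foldl_cons, ih (fun x hx => hin x (List.mem_cons_of_mem _ hx))]
    have hstep : (pvFileStep d dec).getD f 0 = d.getD f 0 + ((dec.2.map (·.1)).count f : Int) := by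
      rw [show pvFileStep d dec = (dec.2.map (·.1)).foldl (fun d x => d.modify x 0 (· + 1)) d
        from pv_foldl_key (fun ef : String × List String × List String => ef.1) (fun (d : PySem.Dict String Int) x => d.modify x 0 (· + 1)) dec.2 d]
      exact PySem.Dict.getD_foldl_modify_add_one _ _ _
    rw [hstep, List.countP_cons]
    have hnd := hin dec List.mem_cons_self
    by_cases hm : f ∈ dec.2.map (·.1)
    · rw [List.count_eq_one_of_mem hnd hm]
      simp [hm]
      ring
    · rw [List.count_eq_zero.mpr hm]
      simp [hm]

lemma pv_has_false_of_not_key (fd : List (String × List String × List String)) (f e : String)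
    (h : f ∉ fd.map (·.1)) : pvHas fd f e = false := by
  rw [pvHas, List.any_eq_false]
  intro ef hef
  have : ef.1 ≠ f := fun hEq => h (hEq ▸ List.mem_map_of_mem hef)
  simp [this]

lemma pv_errCnt_dec (fd : List (String × List String × List String))
    (hnd : (fd.map (·.1)).Nodup) (d : PySem.Dict (String × String) Int) (f e : String) :
    (fd.foldl (fun d ef => (PySem.Set.ofList ef.2.1).foldl (fun d x => d.modify (ef.1, x) 0 (· + 1)) d) d).getD (f, e) 0
      = d.getD (f, e) 0 + (if pvHas fd f e then 1 else 0) := by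
  induction fd generalizing d with
  | nil => simp [pvHas]
  | cons ef tl ih =>
    obtain ⟨hhead, htl⟩ := List.nodup_cons.mp (by simpa only [List.map_cons] using hnd)
    rw [List.foldl_cons, ih htl]
    have hstep : ((PySem.Set.ofList ef.2.1).foldl (fun d x => d.modify (ef.1, x) 0 (· + 1)) d).getD (f, e) 0
        = d.getD (f, e) 0 + (if ef.1 = f ∧ e ∈ ef.2.1 then 1 else 0) := by
      rw [show ((PySem.Set.ofList ef.2.1).foldl (fun d x => d.modify (ef.1, x) 0 (· + 1)) d)
            = (((PySem.Set.ofList ef.2.1).map (fun x => (ef.1, x))).foldl (fun d p => d.modify p 0 (· + 1)) d)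
          from pv_foldl_key (fun x : String => ((ef.1, x) : String × String)) (fun (d : PySem.Dict (String × String) Int) p => d.modify p 0 (· + 1)) _ d]
      rw [PySem.Dict.getD_foldl_modify_add_one]
      congr 1
      by_cases hf : ef.1 = f
      · subst hf
        have : ((PySem.Set.ofList ef.2.1).map (fun x => (ef.1, x))).count (ef.1, e)
            = (PySem.Set.ofList ef.2.1).count e :=
          List.count_map_of_injective _ _ (fun x y hxy => (Prod.mk.injEq _ _ _ _).mp hxy |>.2) _
        rw [this]
        by_cases he : e ∈ ef.2.1
        · rw [List.count_eq_one_of_mem (PySem.Set.nodup_ofList _) ((PySem.Set.mem_ofList _ _).mpr he)]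
          simp [he]
        · rw [List.count_eq_zero.mpr (fun hx => he ((PySem.Set.mem_ofList _ _).mp hx))]
          simp [he]
      · rw [List.count_eq_zero.mpr]
        · simp [hf]
        · intro hx
          rcases List.mem_map.mp hx with ⟨x, -, hx2⟩
          exact hf ((Prod.mk.injEq _ _ _ _).mp hx2 |>.1)
    rw [hstep]
    by_cases hm : ef.1 = f ∧ e ∈ ef.2.1
    · have htlf : pvHas tl f e = false := by
        apply pv_has_false_of_not_key
        rw [← hm.1]; exact hhead
      have : pvHas (ef :: tl) f e = true := by
        rw [pvHas, List.any_cons]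
        simp [hm.1, hm.2]
      rw [this, htlf]
      simp [hm]
    · have : pvHas (ef :: tl) f e = pvHas tl f e := by
        rw [pvHas, List.any_cons, pvHas]
        have : (ef.1 == f && ef.2.1.contains e) = false := by
          rcases not_and_or.mp hm with h | h <;> simp [h]
        rw [this, Bool.false_or]
      rw [this]
      simp [hm]

lemma pv_errCnt (errs : List (String × List (String × List String × List String)))
    (hin : ∀ dec ∈ errs, (dec.2.map (·.1)).Nodup) (d : PySem.Dict (String × String) Int) (f e : String) :
    (errs.foldl pvErrStep d).getD (f, e) 0
      = d.getD (f, e) 0 + (errs.countP (fun dec => pvHas dec.2 f e) : Int) := by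
  induction errs generalizing d with
  | nil => simp
  | cons dec rest ih =>
    rw [List.foldl_cons, ih (fun x hx => hin x (List.mem_cons_of_mem _ hx))]
    rw [show pvErrStep d dec = dec.2.foldl (fun d ef => (PySem.Set.ofList ef.2.1).foldl (fun d x => d.modify (ef.1, x) 0 (· + 1)) d) d from rfl]
    rw [pv_errCnt_dec dec.2 (hin dec List.mem_cons_self) d f e, List.countP_cons]
    by_cases hm : pvHas dec.2 f e
    · simp [hm]
      ring
    · simp [hm]

lemma pv_countP_full {β : Type} (l : List β) (p : β → Bool) :
    ((l.countP p : Int) == (l.length : Int)) = l.all p := by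
  rw [Bool.eq_iff_iff, beq_iff_eq, Nat.cast_inj, List.countP_eq_length, List.all_eq_true]

lemma pv_foldl_inter_filter {γ : Type} (rest : List γ) (x : γ → List String) (s : PySem.Set String) :
    rest.foldl (fun s dec => PySem.Set.inter s (PySem.Set.ofList (x dec))) s
      = s.filter (fun e => rest.all (fun dec => (PySem.Set.ofList (x dec)).contains e)) := by
  induction rest generalizing s with
  | nil => simp
  | cons dec t ih =>
    rw [List.foldl_cons, ih, PySem.Set.inter, List.filter_filter]
    apply List.filter_congr
    intro e _
    simp [Bool.and_comm]

lemma pv_ofList_filter (l : List String) (p : String → Bool) :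
    PySem.Set.ofList (l.filter p) = (PySem.Set.ofList l).filter p := by
  induction l with
  | nil => rfl
  | cons x xs ih =>
    by_cases hp : p x
    · rw [List.filter_cons_of_pos hp, PySem.Set.ofList_cons, PySem.Set.ofList_cons, ih,
        List.filter_cons_of_pos hp, PySem.Set.discard, PySem.Set.discard, List.filter_filter,
        List.filter_filter]
      congr 1
      exact List.filter_congr (fun y _ => Bool.and_comm _ _)
    · rw [List.filter_cons_of_neg hp, PySem.Set.ofList_cons, ih, List.filter_cons_of_neg hp,
        PySem.Set.discard, List.filter_filter]
      apply List.filter_congr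
      intro y _
      by_cases hy : p y
      · have : y ≠ x := fun hEq => hp (hEq ▸ hy)
        simp [hy, this]
      · simp [hy]

lemma pv_has_iff (fd : List (String × List String × List String))
    (hnd : (fd.map (·.1)).Nodup) (f e : String) :
    pvHas fd f e = true ↔ f ∈ fd.map (·.1) ∧ e ∈ (pvLookup fd f).1 := by
  constructor
  · intro h
    rw [pvHas, List.any_eq_true] at h
    obtain ⟨ef, hef, hb⟩ := h
    obtain ⟨h1, h2⟩ := Bool.and_eq_true_iff.mp hb
    have hf : ef.1 = f := beq_iff_eq.mp h1
    have hl : pvLookup fd f = ef.2 := hf ▸ pvLookup_of_mem fd hnd ef hef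
    refine ⟨hf ▸ List.mem_map_of_mem hef, ?_⟩
    rw [hl]
    simpa using h2
  · rintro ⟨h1, h2⟩
    obtain ⟨ef, hef, hf⟩ := List.mem_map.mp h1
    have hl : pvLookup fd f = ef.2 := hf ▸ pvLookup_of_mem fd hnd ef hef
    rw [pvHas, List.any_eq_true]
    refine ⟨ef, hef, ?_⟩
    rw [hl] at h2
    simp [hf, h2]

lemma pv_B_canon (errs : List (String × List (String × List String × List String)))
    (hpre : Pre_split_errs errs) : split_errs_alt errs = pvCanon errs := by
  cases errs with
  | nil => rfl
  | cons d0 rest =>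
    obtain ⟨hod, hinner⟩ := hpre
    have hk0 : (d0.2.map (·.1)).Nodup := hinner d0 List.mem_cons_self
    -- counter characterizations
    have hcnts : pvB_cnts (d0 :: rest)
        = ((d0 :: rest).foldl pvFileStep PySem.Dict.empty,
           (d0 :: rest).foldl pvErrStep PySem.Dict.empty) := pv_cnts_split _ _ _
    have hfile : ∀ f : String, (pvB_cnts (d0 :: rest)).1.getD f 0
        = ((d0 :: rest).countP (fun dec => decide (f ∈ dec.2.map (·.1))) : Int) := by
      intro f
      rw [hcnts]
      have := pv_fileCnt (d0 :: rest) hinner PySem.Dict.empty f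
      simpa using this
    have herr : ∀ f e : String, (pvB_cnts (d0 :: rest)).2.getD (f, e) 0
        = ((d0 :: rest).countP (fun dec => pvHas dec.2 f e) : Int) := by
      intro f e
      rw [hcnts]
      have := pv_errCnt (d0 :: rest) hinner PySem.Dict.empty f e
      simpa using this
    -- the two predicates used by B, as canonical conditions
    have hP : ∀ f ∈ d0.2.map (·.1),
        ((pvB_cnts (d0 :: rest)).1.getD f 0 == ((d0 :: rest).length : Int))
          = rest.all (fun dec => dec.2.any (fun ef => ef.1 == f)) := by
      intro f hf
      rw [hfile f, pv_countP_full]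
      rw [Bool.eq_iff_iff]
      simp only [List.all_eq_true, List.any_eq_true, beq_iff_eq, List.mem_cons,
        decide_eq_true_eq]
      constructor
      · intro h dec hd
        obtain ⟨ef, hef, he⟩ := List.mem_map.mp (h dec (Or.inr hd))
        exact ⟨ef, hef, he⟩
      · rintro h dec (rfl | hd)
        · exact hf
        · obtain ⟨ef, hef, he⟩ := h dec hd
          exact List.mem_map.mpr ⟨ef, hef, he⟩
    have hq : ∀ f, f ∈ d0.2.map (·.1) →
        rest.all (fun dec => dec.2.any (fun ef => ef.1 == f)) = true →
        ∀ e : String,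
        ((pvB_cnts (d0 :: rest)).2.getD (f, e) 0 == ((d0 :: rest).length : Int))
          = ((rest.foldl (fun s dec => PySem.Set.inter s (PySem.Set.ofList (pvLookup dec.2 f).1))
               (PySem.Set.ofList (pvLookup d0.2 f).1)).contains e) := by
      intro f hf hPf e
      rw [herr f e, pv_countP_full, pv_foldl_inter_filter]
      rw [Bool.eq_iff_iff]
      simp only [List.all_eq_true, PySem.Set.contains_eq_listContains, List.contains_iff_mem,
        List.mem_filter, PySem.Set.mem_ofList, List.mem_cons]
      have hPf' : ∀ dec ∈ rest, f ∈ dec.2.map (·.1) := by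
        intro dec hd
        simp only [List.all_eq_true] at hPf
        have := hPf dec hd
        simp only [List.any_eq_true, beq_iff_eq] at this
        obtain ⟨ef, hef, he⟩ := this
        exact List.mem_map.mpr ⟨ef, hef, he⟩
      constructor
      · intro h
        have hd0 := (pv_has_iff d0.2 hk0 f e).mp (h d0 (Or.inl rfl))
        refine ⟨hd0.2, fun dec hd => ?_⟩
        have := (pv_has_iff dec.2 (hinner dec (List.mem_cons_of_mem _ hd)) f e).mp
          (h dec (Or.inr hd))
        simpa using this.2
      · rintro ⟨h0, hr⟩ dec (rfl | hd)
        · exact (pv_has_iff dec.2 hk0 f e).mpr ⟨hf, h0⟩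
        · refine (pv_has_iff dec.2 (hinner dec (List.mem_cons_of_mem _ hd)) f e).mpr
            ⟨hPf' dec hd, ?_⟩
          simpa using hr dec hd
    -- abbreviations
    set cfs : List String :=
      (d0.2.map (·.1)).filter (fun f => rest.all (fun dec => dec.2.any (fun ef => ef.1 == f)))
      with hcfs_def
    have hcfs_nd : cfs.Nodup := hk0.filter _
    set I : String → PySem.Set String := fun f =>
      rest.foldl (fun s dec => PySem.Set.inter s (PySem.Set.ofList (pvLookup dec.2 f).1))
        (PySem.Set.ofList (pvLookup d0.2 f).1) with hI_def
    -- B's common dict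
    set n : Int := ((d0 :: rest).length : Int) with hn_def
    set cnts := pvB_cnts (d0 :: rest) with hcnts_def
    have hcommonB :
        (d0.2.foldl (fun ce ef =>
            if cnts.1.getD ef.1 0 == n then
              ce.insert ef.1 (PySem.Set.ofList (ef.2.1.filter (fun e => cnts.2.getD (ef.1, e) 0 == n)),
                PySem.Set.ofList (PySem.Set.ofList (ef.2.1.filter (fun e => cnts.2.getD (ef.1, e) 0 == n))))
            else ce) PySem.Dict.empty).items
          = cfs.map (fun f => (f, I f, I f)) := by
      rw [pv_foldl_if_filter]
      rw [PySem.Dict.items_foldl_insert_fresh]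
      · rw [pv_filter_eq_map_lookup d0.2 hk0 (fun f => cnts.1.getD f 0 == n), List.map_map]
        rw [show (PySem.Dict.empty : PySem.Dict String (List String × List String)).items = [] from rfl,
          List.nil_append]
        rw [List.filter_congr (fun f hf => hP f hf)]
        apply List.map_congr_left
        intro f hf
        obtain ⟨hfk, hPf⟩ := List.mem_filter.mp hf
        have hveq : PySem.Set.ofList ((pvLookup d0.2 f).1.filter (fun e => cnts.2.getD (f, e) 0 == n)) = I f := by
          rw [pv_ofList_filter,
            List.filter_congr (fun e _ => hq f hfk hPf e), hI_def]
          dsimp only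
          rw [pv_foldl_inter_filter]
          apply List.filter_congr
          intro e he
          rw [Bool.eq_iff_iff, PySem.Set.contains_iff, List.mem_filter]
          exact ⟨fun h => h.2, fun h => ⟨he, h⟩⟩
        dsimp only [Function.comp_def]
        rw [Prod.mk.injEq]
        refine ⟨rfl, ?_⟩
        rw [Prod.mk.injEq]
        refine ⟨hveq, ?_⟩
        rw [hveq, PySem.Set.ofList_eq_self_of_nodup]
        rw [← hveq]
        exact PySem.Set.nodup_ofList _
      · intro a _
        exact PySem.Dict.contains_empty _
      · have hsub : ((d0.2.filter (fun ef => cnts.1.getD ef.1 0 == n)).map (·.1)).Sublist (d0.2.map (·.1)) :=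
          List.Sublist.map _ (List.filter_sublist)
        exact hk0.sublist hsub
    -- now unfold split_errs_alt and pvCanon
    rw [split_errs_alt, pvCanon]
    simp only []
    rw [Prod.mk.injEq]
    set cB : PySem.Dict String (List String × List String) :=
      (d0.2.foldl (fun ce ef =>
          if cnts.1.getD ef.1 0 == n then
            ce.insert ef.1 (PySem.Set.ofList (ef.2.1.filter (fun e => cnts.2.getD (ef.1, e) 0 == n)),
              PySem.Set.ofList (PySem.Set.ofList (ef.2.1.filter (fun e => cnts.2.getD (ef.1, e) 0 == n))))
          else ce) PySem.Dict.empty) with hcB_def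
    refine ⟨hcommonB, ?_⟩
    -- other side
    have hkeysB : cB.keys = cfs := by
      rw [PySem.Dict.keys, hcommonB, List.map_map]
      simp [Function.comp_def]
    rw [PySem.Dict.items_foldl_insert_fresh _ _ _ _ (fun a _ => PySem.Dict.contains_empty _) hod]
    rw [show (PySem.Dict.empty : PySem.Dict String (List (String × List String × List String))).items = [] from rfl,
      List.nil_append]
    apply List.map_congr_left
    intro dec hdec
    refine congrArg _ ?_
    -- inner dict of dec
    have hfun : (fun (d : PySem.Dict String (List String × List String)) (ef : String × List String × List String) =>
          if cB.contains ef.1 then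
            d.insert ef.1
              (PySem.Set.ofList (ef.2.1.filter (fun e => !(cnts.2.getD (ef.1, e) 0 == n))),
               PySem.Set.ofList (ef.2.2.filter (fun e => !(cnts.2.getD (ef.1, e) 0 == n))))
          else d.insert ef.1 (PySem.Set.ofList ef.2.1, PySem.Set.ofList ef.2.2))
        = (fun (d : PySem.Dict String (List String × List String)) (ef : String × List String × List String) =>
            d.insert ef.1 (if cB.contains ef.1 then
              (PySem.Set.ofList (ef.2.1.filter (fun e => !(cnts.2.getD (ef.1, e) 0 == n))),
               PySem.Set.ofList (ef.2.2.filter (fun e => !(cnts.2.getD (ef.1, e) 0 == n))))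
            else (PySem.Set.ofList ef.2.1, PySem.Set.ofList ef.2.2))) := by
      funext d ef
      by_cases h : cB.contains ef.1 <;> simp [h]
    rw [hfun, PySem.Dict.items_foldl_insert_fresh _ _ _ _ (fun a _ => PySem.Dict.contains_empty _)
      (hinner dec hdec)]
    rw [show (PySem.Dict.empty : PySem.Dict String (List String × List String)).items = [] from rfl,
      List.nil_append]
    apply List.map_congr_left
    intro ef _
    rw [pv_find?_map cfs (fun f => (I f, I f)) ef.1]
    have hcont : cB.contains ef.1 = decide (ef.1 ∈ cfs) := by
      rw [Bool.eq_iff_iff, PySem.Dict.contains_iff_mem_keys, hkeysB]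
      simp
    by_cases hm : ef.1 ∈ cfs
    · obtain ⟨hfk, hPf⟩ := List.mem_filter.mp hm
      have hqe : ∀ e, (!(cnts.2.getD (ef.1, e) 0 == n)) = !((I ef.1).contains e) := by
        intro e
        rw [hq ef.1 hfk hPf e, hI_def]
      rw [hcont]
      simp only [hm, decide_true, if_true]
      rw [Prod.mk.injEq]
      refine ⟨rfl, ?_⟩
      rw [Prod.mk.injEq]
      constructor
      · rw [List.filter_congr (fun e _ => hqe e), pv_ofList_filter, PySem.Set.diff]
      · rw [List.filter_congr (fun e _ => hqe e), pv_ofList_filter, PySem.Set.diff]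
    · rw [hcont]
      simp [hm]

-- ===== VERDICT (by name: the statement is the Claim_ definition above) =====
theorem split_errs_spec : Claim_equal_split_errs := by
  intro errs _ hpre
  exact (pv_A_canon errs hpre).trans (pv_B_canon errs hpre).symm
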